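-- pv_equiv track=rewrite | github.com/beaglemansion/yesjam | programmers/음양_더하기.py | solution
-- ===== SOURCE A (Python) =====
-- def solution(absolutes, signs):
--     answer = 0
--     for num in zip(absolutes, signs):
--         if num[1] == True:
--             answer += num[0]
--         else:
--             answer -= num[0]
--
--     return answer
-- ===== SOURCE B (Python) =====
-- def solution(absolutes, signs):
--     total = sum(a for a, s in zip(absolutes, signs))
--     neg = sum(a for a, s in zip(absolutes, signs) if s != True)
--     return total - 2 * neg
-- ===== Notes on version B (the rewrite author's own statement) =====
-- stated objective: alternative
-- what changed: Replaces the single branching accumulator loop by two branch-free sums (total of all paired absolutes, and the negative part), returning total - 2*neg.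
import Mathlib
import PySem

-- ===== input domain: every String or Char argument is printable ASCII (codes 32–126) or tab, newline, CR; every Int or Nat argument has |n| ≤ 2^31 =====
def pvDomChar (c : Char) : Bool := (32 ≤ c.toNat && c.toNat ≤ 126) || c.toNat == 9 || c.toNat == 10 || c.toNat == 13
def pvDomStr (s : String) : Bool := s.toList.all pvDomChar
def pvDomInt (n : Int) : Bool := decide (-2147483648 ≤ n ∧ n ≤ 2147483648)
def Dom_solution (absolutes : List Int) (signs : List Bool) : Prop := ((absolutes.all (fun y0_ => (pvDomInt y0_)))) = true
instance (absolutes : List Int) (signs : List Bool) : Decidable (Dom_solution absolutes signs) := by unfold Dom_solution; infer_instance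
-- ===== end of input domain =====

-- B replaces A's single branching accumulator loop by two branch-free sums (total and negative part), returning total - 2*neg; objective: alternative decomposition, same cost.
-- ===== PORT A =====
-- accumulator loop over zip, branching on the sign (loop body as a named helper)
def solStep (answer : Int) (num : Int × Bool) : Int :=
  if num.2 == true then answer + num.1 else answer - num.1

def solution (absolutes : List Int) (signs : List Bool) : Int :=
  (absolutes.zip signs).foldl solStep 0

-- ===== PORT B =====
-- B: two branch-free sums — total of paired absolutes, minus twice the negative part
def solution_alt (absolutes : List Int) (signs : List Bool) : Int :=
  let total := ((absolutes.zip signs).map (fun p => p.1)).sum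
  let neg := (((absolutes.zip signs).filter (fun p => p.2 != true)).map (fun p => p.1)).sum
  total - 2 * neg

-- ===== PRECONDITION & SPEC =====
def Spec_solution (absolutes : List Int) (signs : List Bool) (out : Int) : Prop := out = solution_alt absolutes signs
instance (absolutes : List Int) (signs : List Bool) (out : Int) : Decidable (Spec_solution absolutes signs out) := by unfold Spec_solution; infer_instance

-- ===== CLAIM (what is proved, stated in full; the proofs are below) =====
def Claim_equal_solution : Prop := ∀ (absolutes : List Int) (signs : List Bool), Dom_solution absolutes signs → Spec_solution absolutes signs (solution absolutes signs)

-- ===== LEMMAS AND PROOFS =====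

lemma solStep_true (c x : Int) : solStep c (x, true) = c + x := rfl
lemma solStep_false (c x : Int) : solStep c (x, false) = c - x := rfl

lemma solution_shift (l : List (Int × Bool)) (c : Int) :
    l.foldl solStep c = c + l.foldl solStep 0 := by
  induction l generalizing c with
  | nil => simp
  | cons h t ih =>
    obtain ⟨x, b⟩ := h
    cases b <;> simp only [List.foldl_cons, solStep_true, solStep_false]
    · rw [ih, ih (0 - x)]; ring
    · rw [ih, ih (0 + x)]; ring

lemma solution_eq (l : List (Int × Bool)) :
    l.foldl solStep 0
      = (l.map (fun p => p.1)).sum - 2 * ((l.filter (fun p => p.2 != true)).map (fun p => p.1)).sum := by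
  induction l with
  | nil => simp
  | cons h t ih =>
    obtain ⟨x, b⟩ := h
    cases b <;>
      simp only [List.foldl_cons, solStep_true, solStep_false, List.filter_cons] <;>
      rw [solution_shift, ih] <;> simp <;> ring

-- ===== VERDICT (by name: the statement is the Claim_ definition above) =====
theorem solution_spec : Claim_equal_solution := by
  intro a s _
  unfold Spec_solution solution solution_alt
  exact solution_eq (a.zip s)
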